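-- pv_equiv track=rewrite | github.com/adeepak7/stepik_bioinformatics_specialization_solutions | finding_hidden_messages_in_dna/finding_hidden_messages_in_dna/locations_of_minimum_and_maximum_skew_value.py | find_locations_of_minimum_and_maximum_skew_value
-- ===== SOURCE A (Python) =====
-- import math
--
-- def find_locations_of_minimum_and_maximum_skew_value(text):
--
--     length_of_text = len(text)
--
--     locations_for_minimum_skew_value = []
--     locations_for_maximum_skew_value = []
--
--     minimum_skew_value = math.inf
--     maximum_skew_value = -1 * math.inf
--     skew_value = 0
--
--     for i in range(0, length_of_text):
--
--         if text[i] == 'G':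
--             skew_value += 1
--         elif text[i] == 'C':
--             skew_value -= 1
--
--         if skew_value < minimum_skew_value:
--             minimum_skew_value = skew_value
--             locations_for_minimum_skew_value.clear()
--             locations_for_minimum_skew_value.append(i)
--
--         elif skew_value == minimum_skew_value:
--             locations_for_minimum_skew_value.append(i)
--
--         if skew_value > maximum_skew_value:
--             maximum_skew_value = skew_value
--             locations_for_maximum_skew_value.clear()
--             locations_for_maximum_skew_value.append(i)
--
--         elif skew_value == maximum_skew_value:
--             locations_for_maximum_skew_value.append(i)
--
--     return minimum_skew_value, maximum_skew_value, locations_for_minimum_skew_value, locations_for_maximum_skew_value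
-- ===== SOURCE B (Python) =====
-- def find_locations_of_minimum_and_maximum_skew_value(text):
--     skews = []
--     s = 0
--     for ch in text:
--         if ch == 'G':
--             s += 1
--         elif ch == 'C':
--             s -= 1
--         skews.append(s)
--     mn = min(skews)
--     mx = max(skews)
--     return (mn, mx,
--             [i for i, v in enumerate(skews) if v == mn],
--             [i for i, v in enumerate(skews) if v == mx])
-- ===== Notes on version B (the rewrite author's own statement) =====
-- stated objective: simpler
-- what changed: B first materialises the running-skew list, then gets min/max with the built-ins and collects matching indices with two comprehensions, replacing A's single loop that maintains and clears min/max location lists inline.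
-- outside the precondition, e.g. on find_locations_of_minimum_and_maximum_skew_value(''): A returns (inf, -inf, [], []), B raises ValueError
import Mathlib
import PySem

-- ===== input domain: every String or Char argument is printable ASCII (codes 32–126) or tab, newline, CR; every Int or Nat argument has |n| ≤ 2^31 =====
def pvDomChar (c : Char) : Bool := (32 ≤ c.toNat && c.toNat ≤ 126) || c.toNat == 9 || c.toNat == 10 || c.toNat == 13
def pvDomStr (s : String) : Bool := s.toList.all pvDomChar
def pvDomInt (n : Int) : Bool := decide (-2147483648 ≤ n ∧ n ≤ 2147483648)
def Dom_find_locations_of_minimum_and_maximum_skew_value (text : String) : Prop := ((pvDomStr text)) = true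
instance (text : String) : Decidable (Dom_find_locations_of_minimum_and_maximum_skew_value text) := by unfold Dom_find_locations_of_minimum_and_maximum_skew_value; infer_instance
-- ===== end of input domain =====

-- B computes the skew list first and then uses min/max + index comprehensions (simpler decomposition);
-- equivalence is claimed for non-empty text (see Pre_ below).

-- ===== PORT A =====
-- A's ±math.inf sentinels are ported as `Option Int` (none = not yet set; `skew < inf` is always
-- true, i.e. the `none` branch always replaces), which is exact on every input where A returns ints.
def stepA (st : Option Int × Option Int × Int × List Int × List Int) (p : Int × Char) :
    Option Int × Option Int × Int × List Int × List Int :=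
  let sk := if p.2 = 'G' then st.2.2.1 + 1 else if p.2 = 'C' then st.2.2.1 - 1 else st.2.2.1
  let mnl : Option Int × List Int :=
    match st.1 with
    | none => (some sk, [p.1])
    | some m => if sk < m then (some sk, [p.1]) else if sk = m then (some m, st.2.2.2.1 ++ [p.1]) else (some m, st.2.2.2.1)
  let mxl : Option Int × List Int :=
    match st.2.1 with
    | none => (some sk, [p.1])
    | some M => if sk > M then (some sk, [p.1]) else if sk = M then (some M, st.2.2.2.2 ++ [p.1]) else (some M, st.2.2.2.2)
  (mnl.1, mxl.1, sk, mnl.2, mxl.2)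

def find_locations_of_minimum_and_maximum_skew_value (text : String) : Int × Int × List Int × List Int :=
  let r := (PySem.List.enumerate text.toList 0).foldl stepA (none, none, 0, [], [])
  (r.1.getD 0, r.2.1.getD 0, r.2.2.2.1, r.2.2.2.2)

-- ===== PORT B =====
def stepB (acc : List Int × Int) (ch : Char) : List Int × Int :=
  let s := if ch = 'G' then acc.2 + 1 else if ch = 'C' then acc.2 - 1 else acc.2
  (acc.1 ++ [s], s)

def find_locations_of_minimum_and_maximum_skew_value_alt (text : String) : Int × Int × List Int × List Int :=
  let skews := (text.toList.foldl stepB ([], 0)).1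
  let mn := (PySem.List.min? skews (fun x => x)).getD 0
  let mx := (PySem.List.max? skews (fun x => x)).getD 0
  (mn, mx,
   ((PySem.List.enumerate skews 0).filter (fun p => p.2 == mn)).map (fun p => p.1),
   ((PySem.List.enumerate skews 0).filter (fun p => p.2 == mx)).map (fun p => p.1))

-- ===== PRECONDITION & SPEC =====
-- Pre_ excludes only the empty string: there A returns (inf, -inf, [], []) with float infinities,
-- which is not a value of the declared Int type (and B's min/max raise ValueError).
def Pre_find_locations_of_minimum_and_maximum_skew_value (text : String) : Prop := text ≠ ""
instance (text : String) : Decidable (Pre_find_locations_of_minimum_and_maximum_skew_value text) := by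
  unfold Pre_find_locations_of_minimum_and_maximum_skew_value; infer_instance

def pvWitness_find_locations_of_minimum_and_maximum_skew_value : String := "GAGCCTACTAACGGGAT"

def Spec_find_locations_of_minimum_and_maximum_skew_value (text : String) (out : Int × Int × List Int × List Int) : Prop := out = find_locations_of_minimum_and_maximum_skew_value_alt text
instance (text : String) (out : Int × Int × List Int × List Int) : Decidable (Spec_find_locations_of_minimum_and_maximum_skew_value text out) := by unfold Spec_find_locations_of_minimum_and_maximum_skew_value; infer_instance

-- ===== CLAIM (what is proved, stated in full; the proofs are below) =====
def Claim_equal_find_locations_of_minimum_and_maximum_skew_value : Prop := ∀ (text : String), Dom_find_locations_of_minimum_and_maximum_skew_value text → Pre_find_locations_of_minimum_and_maximum_skew_value text → Spec_find_locations_of_minimum_and_maximum_skew_value text (find_locations_of_minimum_and_maximum_skew_value text)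

-- ===== LEMMAS AND PROOFS =====

-- the running-skew list from initial skew s
def skewsFrom (s : Int) : List Char → List Int
  | [] => []
  | c :: cs =>
    let s' := if c = 'G' then s + 1 else if c = 'C' then s - 1 else s
    s' :: skewsFrom s' cs

-- indices (starting at i) of occurrences of w
def idxs (w : Int) (i : Int) : List Int → List Int
  | [] => []
  | v :: vs => (if v = w then [i] else []) ++ idxs w (i + 1) vs

-- A's min-tracking loop on the value list
def runMin (m : Int) (l : List Int) (i : Int) : List Int → Int × List Int
  | [] => (m, l)
  | v :: vs => if v < m then runMin v [i] (i + 1) vs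
               else if v = m then runMin m (l ++ [i]) (i + 1) vs
               else runMin m l (i + 1) vs

def runMax (m : Int) (l : List Int) (i : Int) : List Int → Int × List Int
  | [] => (m, l)
  | v :: vs => if v > m then runMax v [i] (i + 1) vs
               else if v = m then runMax m (l ++ [i]) (i + 1) vs
               else runMax m l (i + 1) vs

lemma foldlB_eq (cs : List Char) : ∀ (acc : List Int) (s : Int),
    (cs.foldl stepB (acc, s)).1 = acc ++ skewsFrom s cs := by
  induction cs with
  | nil => intro acc s; simp [skewsFrom]
  | cons c cs ih =>
    intro acc s
    simp only [List.foldl_cons, stepB, skewsFrom]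
    rw [ih]
    simp

lemma foldlA_eq (cs : List Char) : ∀ (i s : Int) (m M : Int) (lmin lmax : List Int),
    ∃ t, (PySem.List.enumerate cs i).foldl stepA (some m, some M, s, lmin, lmax)
      = (some (runMin m lmin i (skewsFrom s cs)).1, some (runMax M lmax i (skewsFrom s cs)).1, t,
         (runMin m lmin i (skewsFrom s cs)).2, (runMax M lmax i (skewsFrom s cs)).2) := by
  induction cs with
  | nil => intro i s m M lmin lmax; exact ⟨s, by simp [skewsFrom, runMin, runMax, PySem.List.enumerate]⟩
  | cons c cs ih =>
    intro i s m M lmin lmax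
    rw [PySem.List.enumerate_cons]
    simp only [List.foldl_cons, stepA, skewsFrom, runMin, runMax]
    split_ifs <;> exact ih (i + 1) _ _ _ _ _

lemma foldl_min_le (vs : List Int) : ∀ m : Int, vs.foldl min m ≤ m := by
  induction vs with
  | nil => intro m; simp
  | cons v vs ih =>
    intro m
    simp only [List.foldl_cons]
    exact le_trans (ih (min m v)) (min_le_left m v)

lemma foldl_le_max (vs : List Int) : ∀ m : Int, m ≤ vs.foldl max m := by
  induction vs with
  | nil => intro m; simp
  | cons v vs ih =>
    intro m
    simp only [List.foldl_cons]
    exact le_trans (le_max_left m v) (ih (max m v))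

lemma runMin_eq (vs : List Int) : ∀ (m : Int) (l : List Int) (i : Int),
    runMin m l i vs = (vs.foldl min m,
      (if vs.foldl min m = m then l else []) ++ idxs (vs.foldl min m) i vs) := by
  induction vs with
  | nil => intro m l i; simp [runMin, idxs]
  | cons v vs ih =>
    intro m l i
    simp only [List.foldl_cons, runMin, idxs]
    by_cases h1 : v < m
    · have hmin : min m v = v := by omega
      rw [if_pos h1, ih]
      simp only [hmin]
      have hne : vs.foldl min v ≠ m := by have := foldl_min_le vs v; omega
      rw [if_neg hne]
      by_cases hv : vs.foldl min v = v
      · simp [hv]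
      · have hvne : v ≠ vs.foldl min v := fun h => hv h.symm
        simp [hv, hvne]
    · by_cases h2 : v = m
      · have hmin : min m v = m := by omega
        rw [if_neg h1, if_pos h2, ih]
        simp only [hmin]
        by_cases hm : vs.foldl min m = m
        · simp [hm, h2]
        · have : vs.foldl min m ≠ v := by rw [h2]; exact hm
          have : v ≠ vs.foldl min m := fun h => hm (h2 ▸ h.symm)
          simp [hm, this]
      · have hmin : min m v = m := by omega
        rw [if_neg h1, if_neg h2, ih]
        simp only [hmin]
        have : v ≠ vs.foldl min m := by have := foldl_min_le vs m; omega
        simp [this]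

lemma runMax_eq (vs : List Int) : ∀ (m : Int) (l : List Int) (i : Int),
    runMax m l i vs = (vs.foldl max m,
      (if vs.foldl max m = m then l else []) ++ idxs (vs.foldl max m) i vs) := by
  induction vs with
  | nil => intro m l i; simp [runMax, idxs]
  | cons v vs ih =>
    intro m l i
    simp only [List.foldl_cons, runMax, idxs]
    by_cases h1 : v > m
    · have hmax : max m v = v := by omega
      rw [if_pos h1, ih]
      simp only [hmax]
      have hne : vs.foldl max v ≠ m := by have := foldl_le_max vs v; omega
      rw [if_neg hne]
      by_cases hv : vs.foldl max v = v
      · simp [hv]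
      · have hvne : v ≠ vs.foldl max v := fun h => hv h.symm
        simp [hv, hvne]
    · by_cases h2 : v = m
      · have hmax : max m v = m := by omega
        rw [if_neg h1, if_pos h2, ih]
        simp only [hmax]
        by_cases hm : vs.foldl max m = m
        · simp [hm, h2]
        · have : v ≠ vs.foldl max m := fun h => hm (h2 ▸ h.symm)
          simp [hm, this]
      · have hmax : max m v = m := by omega
        rw [if_neg h1, if_neg h2, ih]
        simp only [hmax]
        have : v ≠ vs.foldl max m := by have := foldl_le_max vs m; omega
        simp [this]

lemma filter_enumerate_eq_idxs (vs : List Int) : ∀ (i w : Int),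
    ((PySem.List.enumerate vs i).filter (fun p => p.2 == w)).map (fun p => p.1) = idxs w i vs := by
  induction vs with
  | nil => intro i w; simp [PySem.List.enumerate, idxs]
  | cons v vs ih =>
    intro i w
    rw [PySem.List.enumerate_cons]
    by_cases h : v = w
    · simp [idxs, h, ih]
    · simp [idxs, h, ih]

-- ===== VERDICT (by name: the statement is the Claim_ definition above) =====
theorem find_locations_of_minimum_and_maximum_skew_value_spec : Claim_equal_find_locations_of_minimum_and_maximum_skew_value := by
  intro text hdom hpre
  unfold Spec_find_locations_of_minimum_and_maximum_skew_value
  obtain ⟨c, cs, hl⟩ : ∃ c cs, text.toList = c :: cs := by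
    cases h : text.toList with
    | nil =>
      refine absurd ?_ hpre
      have h2 := String.ofList_toList (s := text)
      rw [h] at h2
      exact h2.symm
    | cons c cs => exact ⟨c, cs, rfl⟩
  show find_locations_of_minimum_and_maximum_skew_value text = find_locations_of_minimum_and_maximum_skew_value_alt text
  unfold find_locations_of_minimum_and_maximum_skew_value find_locations_of_minimum_and_maximum_skew_value_alt
  rw [hl]
  rw [PySem.List.enumerate_cons, List.foldl_cons, foldlB_eq]
  set x : Int := if c = 'G' then (0:Int) + 1 else if c = 'C' then (0:Int) - 1 else 0 with hx
  have hskews : skewsFrom 0 (c :: cs) = x :: skewsFrom x cs := rfl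
  have hstep : stepA (none, none, 0, [], []) ((0 : Int), c) = (some x, some x, x, [0], [0]) := rfl
  rw [hstep]
  obtain ⟨t, ht⟩ := foldlA_eq cs 1 x x x [0] [0]
  simp only [zero_add]
  rw [ht, hskews]
  simp only [List.nil_append, PySem.List.min?_id_cons, PySem.List.max?_id_cons, Option.getD_some]
  rw [filter_enumerate_eq_idxs, filter_enumerate_eq_idxs]
  rw [runMin_eq, runMax_eq]
  simp only [idxs, Prod.mk.injEq, zero_add]
  refine ⟨trivial, trivial, ?_, ?_⟩
  · by_cases hfx : (skewsFrom x cs).foldl min x = x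
    · simp [hfx]
    · have hfx' : ¬ x = (skewsFrom x cs).foldl min x := fun h => hfx h.symm
      simp [hfx, hfx']
  · by_cases hfx : (skewsFrom x cs).foldl max x = x
    · simp [hfx]
    · have hfx' : ¬ x = (skewsFrom x cs).foldl max x := fun h => hfx h.symm
      simp [hfx, hfx']
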